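-- pv_equiv track=rewrite | github.com/SDS-Lab/ROT-Pooling | backbones/ddi_gin.py | org_batch
-- ===== SOURCE A (Python) =====
-- def org_batch(num):
--     """
--     # generate nodes_orders and
--     :param num: [[2,1][3][4,2,3]],[2,1] means a combination which has two graphs, the nodes of those graphs are 2 and 1.
--     :return:
--         nodes_orders: [0,0,1,2,2,2,3,3,3,3,4,4,5,5,5] responses to the nodes in the graphs of drug combinations.
--         batch_orders: [0,0,1,2,2,2,3,3] responses to the graphs in drug combinations.
--     """
--
--     nodes_order = []
--     batch_order = []
--     for i in range(len(num)):
--         batch_order.append(len(num[i]))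
--         for j in range(len(num[i])):
--             nodes_order.append(num[i][j])
--     nodes_orders = []
--     batch_orders = []
--     num = 0
--     for i in range(len(batch_order)):
--         for j in range(batch_order[i]):
--             batch_orders.append(num)
--         num += 1
--     num_2 = 0
--     for i in range(len(nodes_order)):
--         for j in range(nodes_order[i]):
--             nodes_orders.append(num_2)
--         num_2 += 1
--     return nodes_orders, batch_orders
-- ===== SOURCE B (Python) =====
-- def org_batch(num):
--     """Single interleaved pass over num with a running global graph index."""
--     nodes_orders = []
--     batch_orders = []
--     graph_idx = 0
--     for comb_idx, comb in enumerate(num):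
--         for count in comb:
--             batch_orders.append(comb_idx)
--             nodes_orders.extend([graph_idx] * count)
--             graph_idx += 1
--     return nodes_orders, batch_orders
-- ===== Notes on version B (the rewrite author's own statement) =====
-- stated objective: simpler
-- what changed: B replaces A's intermediate nodes_order/batch_order lists and three separate loops with one interleaved pass over num that carries a running global graph index and emits both output lists directly.
import Mathlib
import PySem

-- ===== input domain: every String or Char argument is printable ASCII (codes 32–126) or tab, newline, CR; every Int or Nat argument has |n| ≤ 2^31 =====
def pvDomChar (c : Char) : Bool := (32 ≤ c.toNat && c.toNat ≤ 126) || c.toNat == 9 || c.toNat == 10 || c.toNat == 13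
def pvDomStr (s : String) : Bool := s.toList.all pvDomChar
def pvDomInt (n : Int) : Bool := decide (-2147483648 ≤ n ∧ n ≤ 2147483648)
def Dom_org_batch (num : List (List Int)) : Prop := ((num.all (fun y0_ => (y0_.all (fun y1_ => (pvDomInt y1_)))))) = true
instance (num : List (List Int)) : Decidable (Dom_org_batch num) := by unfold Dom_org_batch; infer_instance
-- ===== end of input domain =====

-- B does the expansion in ONE interleaved pass over `num` with a running global graph index,
-- instead of A's intermediate nodes_order/batch_order lists and two separate expansion loops (objective: simpler).

-- ===== PORT A =====
-- first loop: build nodes_order (all counts flattened) and batch_order (len of each comb)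
-- second loop: expand batch_order into batch_orders; third loop: expand nodes_order into nodes_orders
def org_batch (num : List (List Int)) : List Int × List Int :=
  let s1 := num.foldl (fun (st : List Int × List Int) comb =>
      (comb.foldl (fun acc x => acc ++ [x]) st.1, st.2 ++ [(comb.length : Int)])) ([], [])
  let s2 := s1.2.foldl (fun (st : List Int × Int) b =>
      ((PySem.List.pyRange 0 b 1).foldl (fun acc _ => acc ++ [st.2]) st.1, st.2 + 1)) ([], 0)
  let s3 := s1.1.foldl (fun (st : List Int × Int) c =>
      ((PySem.List.pyRange 0 c 1).foldl (fun acc _ => acc ++ [st.2]) st.1, st.2 + 1)) ([], 0)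
  (s3.1, s2.1)

-- ===== PORT B =====
-- single pass: for comb_idx, comb in enumerate(num): for count in comb:
--   batch_orders.append(comb_idx); nodes_orders.extend([graph_idx]*count); graph_idx += 1
def org_batch_alt (num : List (List Int)) : List Int × List Int :=
  let fin := (PySem.List.enumerate num 0).foldl
    (fun (st : (List Int × List Int) × Int) p =>
      p.2.foldl (fun (st : (List Int × List Int) × Int) count =>
        ((st.1.1 ++ PySem.List.pyRepeat [st.2] count, st.1.2 ++ [p.1]), st.2 + 1)) st)
    (([], []), 0)
  fin.1

-- ===== PRECONDITION & SPEC =====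
def Spec_org_batch (num : List (List Int)) (out : List Int × List Int) : Prop := out = org_batch_alt num
instance (num : List (List Int)) (out : List Int × List Int) : Decidable (Spec_org_batch num out) := by unfold Spec_org_batch; infer_instance

-- ===== CLAIM (what is proved, stated in full; the proofs are below) =====
def Claim_equal_org_batch : Prop := ∀ (num : List (List Int)), Dom_org_batch num → Spec_org_batch num (org_batch num)

-- ===== LEMMAS AND PROOFS =====

/-- `pvExpand cs g`: repeat `g` `c.toNat` times for each count `c`, with `g` advancing by one per count. -/
def pvExpand : List Int → Int → List Int
  | [], _ => []
  | c :: cs, g => List.replicate c.toNat g ++ pvExpand cs (g + 1)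

/-- batch expansion: for each combination, its index repeated length-many times. -/
def pvBexp : List (List Int) → Int → List Int
  | [], _ => []
  | comb :: rest, s => List.replicate comb.length s ++ pvBexp rest (s + 1)

theorem foldl_concat_const {α : Type} (l : List α) (c : Int) (acc : List Int) :
    l.foldl (fun a _ => a ++ [c]) acc = acc ++ List.replicate l.length c := by
  induction l generalizing acc with
  | nil => simp
  | cons x xs ih => simp [List.foldl_cons, ih, List.replicate_succ]

theorem foldl_pyRange_const (b : Int) (c : Int) (acc : List Int) :
    (PySem.List.pyRange 0 b 1).foldl (fun a _ => a ++ [c]) acc = acc ++ List.replicate b.toNat c := by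
  rw [foldl_concat_const]
  congr 1
  simp [PySem.List.length_pyRange_one]

theorem expand_fun_eq :
    (fun (st : List Int × Int) b =>
        ((PySem.List.pyRange 0 b 1).foldl (fun a _ => a ++ [st.2]) st.1, st.2 + 1))
      = (fun (st : List Int × Int) b => (st.1 ++ List.replicate b.toNat st.2, st.2 + 1)) := by
  funext st b
  rw [foldl_pyRange_const]

theorem foldl_expand (l : List Int) (acc : List Int) (g : Int) :
    l.foldl (fun (st : List Int × Int) b => (st.1 ++ List.replicate b.toNat st.2, st.2 + 1)) (acc, g)
      = (acc ++ pvExpand l g, g + l.length) := by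
  induction l generalizing acc g with
  | nil => simp [pvExpand]
  | cons c cs ih =>
      simp only [List.foldl_cons]
      rw [ih]
      simp only [pvExpand, Prod.mk.injEq, List.append_assoc, List.length_cons]
      exact ⟨trivial, by push_cast; omega⟩

theorem foldl_concat_eq_append (l acc : List Int) :
    l.foldl (fun a x => a ++ [x]) acc = acc ++ l := by
  induction l generalizing acc with
  | nil => simp
  | cons x xs ih => simp [List.foldl_cons, ih]

theorem orgA_first (num : List (List Int)) (n0 b0 : List Int) :
    num.foldl (fun (st : List Int × List Int) comb =>
        (comb.foldl (fun acc x => acc ++ [x]) st.1, st.2 ++ [(comb.length : Int)])) (n0, b0)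
      = (n0 ++ num.flatten, b0 ++ num.map (fun c => (c.length : Int))) := by
  induction num generalizing n0 b0 with
  | nil => simp
  | cons comb rest ih =>
      simp only [List.foldl_cons]
      rw [foldl_concat_eq_append, ih]
      simp [List.append_assoc]

theorem orgA_eq (num : List (List Int)) :
    org_batch num = (pvExpand num.flatten 0, pvExpand (num.map (fun c => (c.length : Int))) 0) := by
  simp only [org_batch, orgA_first, List.nil_append, expand_fun_eq, foldl_expand]

theorem pvExpand_append (l1 l2 : List Int) (g : Int) :
    pvExpand (l1 ++ l2) g = pvExpand l1 g ++ pvExpand l2 (g + l1.length) := by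
  induction l1 generalizing g with
  | nil => simp [pvExpand]
  | cons c cs ih =>
      simp only [List.cons_append, pvExpand, ih, List.append_assoc, List.length_cons]
      have h : g + 1 + (cs.length : Int) = g + ((cs.length + 1 : Nat) : Int) := by push_cast; ring
      rw [h]

theorem pvBexp_eq_expand (num : List (List Int)) (s : Int) :
    pvBexp num s = pvExpand (num.map (fun c => (c.length : Int))) s := by
  induction num generalizing s with
  | nil => simp [pvBexp, pvExpand]
  | cons comb rest ih => simp [pvBexp, pvExpand, ih]

theorem orgB_inner (comb : List Int) (ci : Int) (no bo : List Int) (g : Int) :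
    comb.foldl (fun (st : (List Int × List Int) × Int) count =>
        ((st.1.1 ++ PySem.List.pyRepeat [st.2] count, st.1.2 ++ [ci]), st.2 + 1)) ((no, bo), g)
      = ((no ++ pvExpand comb g, bo ++ List.replicate comb.length ci), g + comb.length) := by
  induction comb generalizing no bo g with
  | nil => simp [pvExpand]
  | cons c cs ih =>
      simp only [List.foldl_cons]
      rw [PySem.List.pyRepeat_singleton, ih]
      simp only [pvExpand, Prod.mk.injEq, List.append_assoc, List.length_cons,
        List.replicate_succ, List.cons_append]
      exact ⟨⟨trivial, by simp⟩, by push_cast; omega⟩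

theorem orgB_outer (num : List (List Int)) (s : Int) (no bo : List Int) (g : Int) :
    (PySem.List.enumerate num s).foldl
        (fun (st : (List Int × List Int) × Int) p =>
          p.2.foldl (fun (st : (List Int × List Int) × Int) count =>
            ((st.1.1 ++ PySem.List.pyRepeat [st.2] count, st.1.2 ++ [p.1]), st.2 + 1)) st)
        ((no, bo), g)
      = ((no ++ pvExpand num.flatten g, bo ++ pvBexp num s), g + num.flatten.length) := by
  induction num generalizing s no bo g with
  | nil => simp [PySem.List.enumerate_nil, pvBexp, pvExpand]
  | cons comb rest ih =>
      rw [PySem.List.enumerate_cons]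
      simp only [List.foldl_cons]
      rw [orgB_inner, ih]
      simp only [List.flatten_cons, pvExpand_append, pvBexp, Prod.mk.injEq,
        List.append_assoc, List.length_append]
      exact ⟨trivial, by push_cast; omega⟩

theorem orgB_eq (num : List (List Int)) :
    org_batch_alt num = (pvExpand num.flatten 0, pvBexp num 0) := by
  simp only [org_batch_alt, orgB_outer, List.nil_append]

-- ===== VERDICT (by name: the statement is the Claim_ definition above) =====
theorem org_batch_spec : Claim_equal_org_batch := by
  intro num _
  unfold Spec_org_batch
  rw [orgA_eq, orgB_eq, pvBexp_eq_expand]
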